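-- pv_equiv track=rewrite | github.com/womogenes/silent-shitler | agents/deeprole/vector_cfr.py | _enumerate_vote_outcomes
-- ===== SOURCE A (Python) =====
-- def _enumerate_vote_outcomes(acting_players, env):
--     """Enumerate all possible vote combinations."""
--     from itertools import product
--     outcomes = []
--     for votes in product([0, 1], repeat=len(acting_players)):
--         outcome = {}
--         for i, player_idx in enumerate(acting_players):
--             outcome[player_idx] = votes[i]
--         outcomes.append(outcome)
--     return outcomes
-- ===== SOURCE B (Python) =====
-- def _enumerate_vote_outcomes(acting_players, env):
--     """Enumerate all possible vote combinations by incremental doubling."""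
--     result = [{}]
--     for player_idx in acting_players:
--         new_result = []
--         for partial in result:
--             for v in (0, 1):
--                 extended = dict(partial)
--                 extended[player_idx] = v
--                 new_result.append(extended)
--         result = new_result
--     return result
-- ===== Notes on version B (the rewrite author's own statement) =====
-- stated objective: alternative
-- what changed: Replaces itertools.product over all vote tuples (plus an inner enumerate/index loop rebuilding each dict from scratch) with an incremental doubling build: start from [{}] and, per player, extend every partial dict with vote 0 and vote 1.
import Mathlib
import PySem

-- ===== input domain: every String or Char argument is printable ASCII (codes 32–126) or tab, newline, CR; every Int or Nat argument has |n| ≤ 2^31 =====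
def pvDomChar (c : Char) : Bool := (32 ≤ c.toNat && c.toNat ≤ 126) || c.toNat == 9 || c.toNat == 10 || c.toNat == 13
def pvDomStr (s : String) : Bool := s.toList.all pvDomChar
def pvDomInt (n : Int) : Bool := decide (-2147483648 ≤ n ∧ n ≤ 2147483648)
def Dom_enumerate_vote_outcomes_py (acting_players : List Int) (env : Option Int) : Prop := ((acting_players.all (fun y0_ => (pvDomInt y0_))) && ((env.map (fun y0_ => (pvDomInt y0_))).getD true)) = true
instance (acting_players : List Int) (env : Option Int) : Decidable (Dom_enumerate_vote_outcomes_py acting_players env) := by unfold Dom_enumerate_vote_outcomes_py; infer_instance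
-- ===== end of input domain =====

-- B replaces the itertools.product enumeration of A with an incremental doubling build
-- (start from [{}], extend each partial dict with vote 0 and 1 per player); same cost, different traversal.


-- ===== PORT A =====
-- product([0, 1], repeat=n): leftmost factor varies slowest, exactly itertools' order
def pvProd01 : Nat → List (List Int)
  | 0 => [[]]
  | n + 1 => ([0, 1] : List Int).flatMap (fun v => (pvProd01 n).map (fun vs => v :: vs))

-- inner loop of A: for i, player_idx in enumerate(acting_players): outcome[player_idx] = votes[i]
-- (votes[i] is always in range since votes has length len(acting_players); .getD 0 is never taken)
def pvOutcomeA (acting_players votes : List Int) : PySem.Dict Int Int :=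
  (PySem.List.enumerate acting_players).foldl
    (fun outcome ip => outcome.insert ip.2 ((PySem.List.pyGet? votes ip.1).getD 0))
    PySem.Dict.empty

def enumerate_vote_outcomes_py (acting_players : List Int) (env : Option Int) : List (List (Int × Int)) :=
  (pvProd01 acting_players.length).foldl
    (fun outcomes votes => outcomes ++ [(pvOutcomeA acting_players votes).items]) []

-- ===== PORT B =====
def enumerate_vote_outcomes_py_alt (acting_players : List Int) (env : Option Int) : List (List (Int × Int)) :=
  (acting_players.foldl
      (fun result p => result.foldl (fun new_result d => new_result ++ [d.insert p 0, d.insert p 1]) [])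
      [PySem.Dict.empty]).map PySem.Dict.items

-- ===== PRECONDITION & SPEC =====
def Spec_enumerate_vote_outcomes_py (acting_players : List Int) (env : Option Int) (out : List (List (Int × Int))) : Prop := out = enumerate_vote_outcomes_py_alt acting_players env
instance (acting_players : List Int) (env : Option Int) (out : List (List (Int × Int))) : Decidable (Spec_enumerate_vote_outcomes_py acting_players env out) := by unfold Spec_enumerate_vote_outcomes_py; infer_instance

-- ===== CLAIM (what is proved, stated in full; the proofs are below) =====
def Claim_equal_enumerate_vote_outcomes_py : Prop := ∀ (acting_players : List Int) (env : Option Int), Dom_enumerate_vote_outcomes_py acting_players env → Spec_enumerate_vote_outcomes_py acting_players env (enumerate_vote_outcomes_py acting_players env)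

-- ===== LEMMAS AND PROOFS =====

-- the dict built by inserting players zipped with votes, starting from d
def pvBuild : List Int → List Int → PySem.Dict Int Int → PySem.Dict Int Int
  | p :: aps, v :: vs, d => pvBuild aps vs (d.insert p v)
  | _, _, d => d

theorem pvProd01_length {n : Nat} {vs : List Int} (h : vs ∈ pvProd01 n) : vs.length = n := by
  induction n generalizing vs with
  | zero => simp [pvProd01] at h; simp [h]
  | succ n ih =>
    simp only [pvProd01, List.mem_flatMap, List.mem_map] at h
    obtain ⟨v, -, ws, hw, rfl⟩ := h
    simp [ih hw]

-- A's enumerate/index inner loop equals the zip-style build, for any start offset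
theorem pvOutcomeA_eq_build (aps : List Int) : ∀ (s : Nat) (votes : List Int)
    (d : PySem.Dict Int Int), s + aps.length ≤ votes.length →
    (PySem.List.enumerate aps (s : Int)).foldl
      (fun outcome ip => outcome.insert ip.2 ((PySem.List.pyGet? votes ip.1).getD 0)) d
    = pvBuild aps (votes.drop s) d := by
  induction aps with
  | nil => intro s votes d _; simp [PySem.List.enumerate_nil, pvBuild]
  | cons p aps ih =>
    intro s votes d h
    have hs : s < votes.length := by simp at h; omega
    have hdrop : votes.drop s = votes[s] :: votes.drop (s + 1) := List.drop_eq_getElem_cons hs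
    rw [PySem.List.enumerate_cons, List.foldl_cons, hdrop]
    have hget : PySem.List.pyGet? votes ((s : Int)) = some votes[s] := by
      rw [PySem.List.pyGet?_natCast]; exact List.getElem?_eq_getElem hs
    simp only [hget, Option.getD_some, pvBuild]
    have : ((s : Int) + 1) = ((s + 1 : Nat) : Int) := by push_cast; ring
    rw [this, ih (s + 1) votes _ (by simp at h ⊢; omega)]

theorem portA_eq_map (aps : List Int) (env : Option Int) :
    enumerate_vote_outcomes_py aps env
    = (pvProd01 aps.length).map (fun vs => (pvBuild aps vs PySem.Dict.empty).items) := by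
  unfold enumerate_vote_outcomes_py
  rw [PySem.List.foldl_append_singleton_eq_map, List.nil_append]
  apply List.map_congr_left
  intro vs hvs
  unfold pvOutcomeA
  have h := pvOutcomeA_eq_build aps 0 vs PySem.Dict.empty (by simp [pvProd01_length hvs])
  rw [Nat.cast_zero, List.drop_zero] at h
  rw [h]

-- the doubling loop over a list of partial dicts, as flatMap over the product
theorem doubling_eq (aps : List Int) : ∀ (ds : List (PySem.Dict Int Int)),
    aps.foldl (fun result p => result.foldl
        (fun new_result d => new_result ++ [d.insert p 0, d.insert p 1]) []) ds
    = ds.flatMap (fun d => (pvProd01 aps.length).map (fun vs => pvBuild aps vs d)) := by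
  induction aps with
  | nil => intro ds; simp [pvProd01, pvBuild]
  | cons p aps ih =>
    intro ds
    have hflat := PySem.List.foldl_append_eq_flatMap
      (l := ds) (g := fun d => [d.insert p 0, d.insert p 1]) (acc := [])
    rw [List.foldl_cons, hflat, List.nil_append, ih, List.flatMap_assoc]
    congr 1
    funext d
    simp only [List.flatMap_cons, List.flatMap_nil, List.append_nil,
      pvProd01, List.length_cons, List.map_append, List.map_map, List.flatMap_cons,
      List.flatMap_nil, List.append_nil]
    rfl

theorem mainEq (aps : List Int) (env : Option Int) :
    enumerate_vote_outcomes_py aps env = enumerate_vote_outcomes_py_alt aps env := by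
  rw [portA_eq_map]
  unfold enumerate_vote_outcomes_py_alt
  rw [doubling_eq]
  simp [List.map_map, Function.comp]

-- ===== VERDICT (by name: the statement is the Claim_ definition above) =====
theorem enumerate_vote_outcomes_py_spec : Claim_equal_enumerate_vote_outcomes_py := by
  intro aps env _
  exact mainEq aps env
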